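-- pv_equiv track=rewrite | github.com/Air2air/z-beam | yaml-processor/yaml_processor.py | _has_severe_structural_issues
-- ===== SOURCE A (Python) =====
-- def _has_severe_structural_issues(frontmatter: str) -> bool:
--     """Check if frontmatter has severe structural issues requiring special handling."""
--     lines = frontmatter.split("\n")
--
--     # Check for excessive repetitions (even a single line with multiple repetitions)
--     for line in lines:
--         composition_count = line.count("(composition data)")
--         if composition_count > 3:  # Lowered threshold
--             return True
--
--     # Check for broken indentation (4+ spaces when should be 2)
--     bad_indent_count = sum(
--         1 for line in lines if line.startswith("    ") and ":" in line
--     )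
--     if bad_indent_count > 3:
--         return True
--
--     # Check for malformed array items
--     bad_array_count = sum(
--         1
--         for line in lines
--         if line.strip().startswith("-") and not line.lstrip().startswith("- ")
--     )
--     if bad_array_count > 2:
--         return True
--
--     # Check for broken YAML structure (properties without proper parent sections)
--     broken_structure = 0
--     for i, line in enumerate(lines):
--         if (
--             ":" in line
--             and not line.startswith(" ")
--             and not line.strip().endswith(":")
--         ):
--             # This might be a property that should be under a section
--             if any(
--                 prop in line
--                 for prop in [
--                     "powerRange",
--                     "wavelength",
--                     "spotSize",
--                     "density",
--                     "thermalConductivity",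
--                 ]
--             ):
--                 broken_structure += 1
--
--     if broken_structure > 2:
--         return True
--
--     return False
-- ===== SOURCE B (Python) =====
-- def _has_severe_structural_issues(frontmatter: str) -> bool:
--     """Single pass over the lines maintaining four counters, fused verdict at the end."""
--     comp = bad_indent = bad_array = broken = 0
--     props = ("powerRange", "wavelength", "spotSize", "density", "thermalConductivity")
--     for line in frontmatter.split("\n"):
--         if line.count("(composition data)") > 3:
--             comp += 1
--         if line.startswith("    ") and ":" in line:
--             bad_indent += 1
--         if line.strip().startswith("-") and not line.lstrip().startswith("- "):
--             bad_array += 1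
--         if (":" in line and not line.startswith(" ")
--                 and not line.strip().endswith(":")
--                 and any(p in line for p in props)):
--             broken += 1
--     return comp > 0 or bad_indent > 3 or bad_array > 2 or broken > 2
-- ===== Notes on version B (the rewrite author's own statement) =====
-- stated objective: alternative
-- what changed: A's four separate scans over the lines (with early returns) are fused into one loop that maintains four counters and a single final disjunction.
import Mathlib
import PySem

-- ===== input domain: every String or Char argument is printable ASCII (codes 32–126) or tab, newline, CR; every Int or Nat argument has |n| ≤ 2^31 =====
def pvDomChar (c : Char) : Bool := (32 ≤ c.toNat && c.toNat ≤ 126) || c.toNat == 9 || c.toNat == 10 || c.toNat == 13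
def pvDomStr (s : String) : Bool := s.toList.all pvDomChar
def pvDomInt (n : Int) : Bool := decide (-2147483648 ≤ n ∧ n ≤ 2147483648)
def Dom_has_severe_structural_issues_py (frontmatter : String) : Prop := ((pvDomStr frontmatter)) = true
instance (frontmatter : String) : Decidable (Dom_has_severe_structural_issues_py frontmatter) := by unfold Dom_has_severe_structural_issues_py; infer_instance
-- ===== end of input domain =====

-- B fuses A's four separate scans over the lines into one loop maintaining four
-- counters and a single final disjunction; same return value everywhere.

-- shared helpers: the four line predicates, byte-for-byte the Python conditions
def pvProps : List String :=
  ["powerRange", "wavelength", "spotSize", "density", "thermalConductivity"]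

-- line.count("(composition data)") > 3
def pvCompRep (line : List Char) : Bool :=
  decide (3 < PySem.Chars.count line "(composition data)".toList)
-- line.startswith("    ") and ":" in line
def pvBadIndent (line : List Char) : Bool :=
  PySem.Chars.startswith line "    ".toList && PySem.Chars.isIn ":".toList line
-- line.strip().startswith("-") and not line.lstrip().startswith("- ")
def pvBadArray (line : List Char) : Bool :=
  PySem.Chars.startswith (PySem.Chars.strip line) "-".toList &&
    !(PySem.Chars.startswith (PySem.Chars.lstrip line) "- ".toList)
-- ":" in line and not line.startswith(" ") and not line.strip().endswith(":")
def pvOrphan (line : List Char) : Bool :=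
  PySem.Chars.isIn ":".toList line && !(PySem.Chars.startswith line " ".toList) &&
    !(PySem.Chars.endswith (PySem.Chars.strip line) ":".toList)
-- any(prop in line for prop in [...])
def pvHasProp (line : List Char) : Bool :=
  pvProps.any (fun prop => PySem.Chars.isIn prop.toList line)

-- ===== PORT A =====
def has_severe_structural_issues_py (frontmatter : String) : Bool :=
  let lines := PySem.Chars.splitOn frontmatter.toList ['\n']
  -- pass 1: excessive "(composition data)" repetitions (loop with early return)
  if lines.any pvCompRep then true
  else
    -- pass 2: broken indentation (sum of a generator)
    let bad_indent_count := lines.countP pvBadIndent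
    if 3 < bad_indent_count then true
    else
      -- pass 3: malformed array items (sum of a generator)
      let bad_array_count := lines.countP pvBadArray
      if 2 < bad_array_count then true
      else
        -- pass 4: properties without proper parent sections (counter loop, nested ifs)
        let broken_structure := lines.foldl
          (fun acc line =>
            if pvOrphan line then
              if pvHasProp line then acc + 1 else acc
            else acc) (0 : Nat)
        decide (2 < broken_structure)

-- ===== PORT B =====
def pvStep (st : Nat × Nat × Nat × Nat) (line : List Char) : Nat × Nat × Nat × Nat :=
  let (c, i, a, b) := st
  let c := if pvCompRep line then c + 1 else c
  let i := if pvBadIndent line then i + 1 else i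
  let a := if pvBadArray line then a + 1 else a
  let b := if pvOrphan line && pvHasProp line then b + 1 else b
  (c, i, a, b)

def has_severe_structural_issues_py_alt (frontmatter : String) : Bool :=
  let (comp, bad_indent, bad_array, broken) :=
    (PySem.Chars.splitOn frontmatter.toList ['\n']).foldl pvStep (0, 0, 0, 0)
  decide (0 < comp) || decide (3 < bad_indent) || decide (2 < bad_array) || decide (2 < broken)

-- ===== PRECONDITION & SPEC =====
def Spec_has_severe_structural_issues_py (frontmatter : String) (out : Bool) : Prop := out = has_severe_structural_issues_py_alt frontmatter
instance (frontmatter : String) (out : Bool) : Decidable (Spec_has_severe_structural_issues_py frontmatter out) := by unfold Spec_has_severe_structural_issues_py; infer_instance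

-- ===== CLAIM (what is proved, stated in full; the proofs are below) =====
def Claim_equal_has_severe_structural_issues_py : Prop := ∀ (frontmatter : String), Dom_has_severe_structural_issues_py frontmatter → Spec_has_severe_structural_issues_py frontmatter (has_severe_structural_issues_py frontmatter)

-- ===== LEMMAS AND PROOFS =====

def pvP4 (line : List Char) : Bool := pvOrphan line && pvHasProp line

-- B's fold computes the four per-predicate counts
lemma pvStep_fold (ls : List (List Char)) (c i a b : Nat) :
    ls.foldl pvStep (c, i, a, b) =
      (c + ls.countP pvCompRep, i + ls.countP pvBadIndent,
       a + ls.countP pvBadArray, b + ls.countP pvP4) := by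
  induction ls generalizing c i a b with
  | nil => simp
  | cons x xs ih =>
    simp only [List.foldl_cons, List.countP_cons, pvStep, pvP4]
    rw [ih]
    by_cases h1 : pvCompRep x <;> by_cases h2 : pvBadIndent x <;>
      by_cases h3 : pvBadArray x <;> by_cases h4 : pvOrphan x && pvHasProp x <;>
      simp [h1, h2, h3, h4] <;> omega

-- A's fourth loop computes the count of pvP4
lemma pvA4_fold (ls : List (List Char)) (n : Nat) :
    ls.foldl
      (fun acc line =>
        if pvOrphan line then
          if pvHasProp line then acc + 1 else acc
        else acc) n = n + ls.countP pvP4 := by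
  induction ls generalizing n with
  | nil => simp
  | cons x xs ih =>
    simp only [List.foldl_cons, List.countP_cons, pvP4]
    rw [ih]
    by_cases h1 : pvOrphan x <;> by_cases h2 : pvHasProp x <;>
      simp [h1, h2] <;> omega

-- A's early-return first pass, as a count
lemma pvAny_eq_countP_pos (ls : List (List Char)) :
    ls.any pvCompRep = decide (0 < ls.countP pvCompRep) := by
  rcases h : ls.any pvCompRep with _ | _
  · simp only [List.any_eq_false] at h
    have h0 : ls.countP pvCompRep = 0 := List.countP_eq_zero.mpr (by simpa using h)
    simp [h0]
  · simp only [List.any_eq_true] at h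
    obtain ⟨x, hx, hpx⟩ := h
    have hpos : 0 < ls.countP pvCompRep := by
      rw [Nat.pos_iff_ne_zero]
      intro h0
      exact absurd hpx (by simpa using (List.countP_eq_zero.mp h0) x hx)
    simp [hpos]

-- ===== VERDICT (by name: the statement is the Claim_ definition above) =====
theorem has_severe_structural_issues_py_spec : Claim_equal_has_severe_structural_issues_py := by
  intro fm _
  unfold Spec_has_severe_structural_issues_py
  unfold has_severe_structural_issues_py has_severe_structural_issues_py_alt
  simp only [pvStep_fold, pvA4_fold, pvAny_eq_countP_pos, Nat.zero_add]
  by_cases h1 : 0 < (PySem.Chars.splitOn fm.toList ['\n']).countP pvCompRep <;>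
  by_cases h2 : 3 < (PySem.Chars.splitOn fm.toList ['\n']).countP pvBadIndent <;>
  by_cases h3 : 2 < (PySem.Chars.splitOn fm.toList ['\n']).countP pvBadArray <;>
    simp [h1, h2, h3]
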